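-- pv_equiv track=rewrite | github.com/NathanCQC/wall_chebyshev | wallcheb/operators/hubbard_model.py | count_set_even_bits
-- ===== SOURCE A (Python) =====
-- def count_set_even_bits(n):
--     m = n
--     count = 0
--     while m:
--         if m & 1:
--             count += 1
--         m = m >> 2
--     return count
-- ===== SOURCE B (Python) =====
-- def count_set_even_bits(n):
--     # Same count, via the binary string: reverse it so index 0 is the LSB,
--     # keep every second character, count the '1's.
--     return bin(n)[2:][::-1][::2].count('1')
-- ===== Notes on version B (the rewrite author's own statement) =====
-- stated objective: idiomatic
-- what changed: Replaces the shift-by-2/test-bit loop with a one-liner over the binary string representation: bin(n)[2:] reversed, sliced with step 2, and counted for '1' characters.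
import Mathlib
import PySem

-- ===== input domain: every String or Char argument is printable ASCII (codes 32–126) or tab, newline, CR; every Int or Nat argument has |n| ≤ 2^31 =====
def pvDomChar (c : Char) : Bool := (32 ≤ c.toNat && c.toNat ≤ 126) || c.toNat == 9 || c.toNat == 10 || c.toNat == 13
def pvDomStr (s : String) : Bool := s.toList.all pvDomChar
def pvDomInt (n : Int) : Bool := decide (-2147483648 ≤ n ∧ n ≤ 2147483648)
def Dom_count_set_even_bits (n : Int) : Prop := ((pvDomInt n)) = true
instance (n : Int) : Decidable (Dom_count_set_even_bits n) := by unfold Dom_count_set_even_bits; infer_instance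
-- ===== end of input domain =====

-- B computes the same count by slicing the binary string (bin(n)[2:][::-1][::2].count('1'))
-- instead of A's shift-by-2/test-bit loop; objective: idiomatic.

-- ===== PORT A =====
-- cited by csebLoop's decreasing_by: n >> 2 on a nonnegative int is division by 4
theorem pvShiftTwo (k : Nat) : ((k : Int)) >>> (2 : Nat) = ((k / 4 : Nat) : Int) := by
  rw [← Int.natCast_shiftRight]
  norm_num [Nat.shiftRight_eq_div_pow]

-- A's while loop; for m < 0 Python never terminates (excluded by Pre_), the port returns count there
def csebLoop (m count : Int) : Int :=
  if m = 0 then count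
  else if m < 0 then count       -- unreachable under Pre_: Python's loop diverges for negative m
  else csebLoop (m >>> (2 : Nat)) (if PySem.Int.band m 1 ≠ 0 then count + 1 else count)
termination_by m.toNat
decreasing_by
  rename_i h0 hneg
  have hm : 0 < m := by omega
  have h : m >>> (2 : Nat) = ((m.toNat / 4 : Nat) : Int) := by
    conv_lhs => rw [show m = ((m.toNat : Nat) : Int) by omega]
    exact pvShiftTwo m.toNat
  rw [h]
  omega

def count_set_even_bits (n : Int) : Int :=
  csebLoop n 0

-- ===== PORT B =====
-- bin(n)[2:][::-1][::2].count('1'); str.count with the single-character needle '1'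
-- counts exactly the '1' characters, ported as List.count '1' (exact for a 1-char needle)
def count_set_even_bits_alt (n : Int) : Int :=
  let s := PySem.List.slice (PySem.Int.toBinChars0b n) (some 2) none          -- bin(n)[2:]
  let r := (PySem.List.slice? s none none (-1)).getD []                       -- s[::-1] (step ≠ 0: never none)
  let e := (PySem.List.slice? r none none 2).getD []                          -- r[::2] (step ≠ 0: never none)
  (e.count '1' : Int)

-- ===== PRECONDITION & SPEC =====
-- Pre_ excludes only negative n, on which A's while loop never terminates (m >> 2 stays negative).
def Pre_count_set_even_bits (n : Int) : Prop := 0 ≤ n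
instance (n : Int) : Decidable (Pre_count_set_even_bits n) := by unfold Pre_count_set_even_bits; infer_instance
def pvWitness_count_set_even_bits : Int := 13

def Spec_count_set_even_bits (n : Int) (out : Int) : Prop := out = count_set_even_bits_alt n
instance (n : Int) (out : Int) : Decidable (Spec_count_set_even_bits n out) := by unfold Spec_count_set_even_bits; infer_instance

-- ===== CLAIM (what is proved, stated in full; the proofs are below) =====
def Claim_equal_count_set_even_bits : Prop := ∀ (n : Int), Dom_count_set_even_bits n → Pre_count_set_even_bits n → Spec_count_set_even_bits n (count_set_even_bits n)

-- ===== LEMMAS AND PROOFS =====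

-- the common value: the bits of n at positions 0, 2, 4, …
def evenBitCount (n : Nat) : Nat :=
  if n = 0 then 0 else n % 2 + evenBitCount (n / 4)
decreasing_by omega

-- every second element of a list, starting with the first (what [::2] selects)
def everyOther {α : Type} : List α → List α
  | [] => []
  | [a] => [a]
  | a :: _ :: r => a :: everyOther r

-- A's loop accumulates evenBitCount
theorem csebLoop_eq (k : Nat) (c : Int) : csebLoop (k : Int) c = c + (evenBitCount k : Int) := by
  induction k using Nat.strong_induction_on generalizing c with
  | _ k ih =>
    rw [csebLoop, evenBitCount]
    rcases Nat.eq_zero_or_pos k with hk | hk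
    · simp [hk]
    · have h0 : (k : Int) ≠ 0 := by omega
      have hneg : ¬ ((k : Int) < 0) := by omega
      have hband : PySem.Int.band (k : Int) 1 = ((k % 2 : Nat) : Int) := by
        rw [show (1 : Int) = ((1 : Nat) : Int) from rfl, PySem.Int.band_natCast]
        congr 1
        exact Nat.and_one_is_mod k
      rw [if_neg h0, if_neg hneg, pvShiftTwo, ih (k / 4) (by omega), hband]
      have h2 : k % 2 = 0 ∨ k % 2 = 1 := by omega
      rcases h2 with h2 | h2 <;> (rw [h2]; simp [hk.ne']) <;> push_cast <;> ring

-- binary digits of n, most significant first (mirrors Nat.toDigitsCore's structure at base 2)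
def bitsMSB (n : Nat) : List Char :=
  if n / 2 = 0 then [Nat.digitChar (n % 2)]
  else bitsMSB (n / 2) ++ [Nat.digitChar (n % 2)]
decreasing_by omega

theorem toDigitsCore_two (f : Nat) : ∀ (n : Nat) (l : List Char), n < f →
    Nat.toDigitsCore 2 f n l = bitsMSB n ++ l := by
  induction f with
  | zero => intro n l h; omega
  | succ f ih =>
    intro n l h
    rw [Nat.toDigitsCore, bitsMSB]
    by_cases h2 : n / 2 = 0
    · simp [h2]
    · rw [if_neg h2, if_neg h2, ih (n / 2) _ (by omega)]
      simp

theorem toDigits_two (n : Nat) : Nat.toDigits 2 n = bitsMSB n := by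
  have h := toDigitsCore_two (n + 1) n [] (by omega)
  simpa [Nat.toDigits] using h

-- xs[::2] selects the indices 0, 2, 4, …
theorem slice?_two {α : Type} (xs : List α) :
    PySem.List.slice? xs none none 2 =
      some ((List.range ((xs.length + 1) / 2)).filterMap (fun k => xs[2 * k]?)) := by
  simp only [PySem.List.slice?, PySem.List.sliceIndices]
  norm_num
  rcases Nat.eq_zero_or_pos xs.length with h | h
  · simp [List.length_eq_zero_iff.mp h]
  · rw [if_pos h]
    have h1 : ((((xs.length : Int)) + 2 - 1) / 2).toNat = (xs.length + 1) / 2 := by omega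
    rw [h1]
    congr 1

-- … and those indices, read off a list, are everyOther
theorem filterMap_everyOther {α : Type} (xs : List α) :
    (List.range ((xs.length + 1) / 2)).filterMap (fun k => xs[2 * k]?) = everyOther xs := by
  induction xs using everyOther.induct with
  | case1 => simp [everyOther]
  | case2 a => simp [everyOther]
  | case3 a b r ih =>
    simp only [everyOther, ← ih, List.length_cons]
    have h2 : (r.length + 1 + 1 + 1) / 2 = (r.length + 1) / 2 + 1 := by omega
    rw [h2, List.range_succ_eq_map]
    simp only [List.filterMap_cons, List.filterMap_map]
    norm_num
    congr 1

-- reversing the binary digits exposes the least-significant bit first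
theorem bitsMSB_reverse (n : Nat) :
    (bitsMSB n).reverse = Nat.digitChar (n % 2) :: (if n / 2 = 0 then [] else (bitsMSB (n / 2)).reverse) := by
  rw [bitsMSB]
  by_cases h : n / 2 = 0 <;> simp [h]

-- counting '1' at the even positions of the reversed binary digits is evenBitCount
theorem count_everyOther_rev (n : Nat) (hn : 0 < n) :
    (everyOther (bitsMSB n).reverse).count '1' = evenBitCount n := by
  induction n using Nat.strong_induction_on with
  | _ n ih =>
    rw [bitsMSB_reverse]
    by_cases h2 : n / 2 = 0
    · have : n = 1 := by omega
      subst this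
      have e0 : evenBitCount 0 = 0 := by rw [evenBitCount]; norm_num
      have e1 : evenBitCount 1 = 1 := by rw [evenBitCount]; norm_num [e0]
      simp [everyOther, e1, Nat.digitChar]
    · rw [if_neg h2, bitsMSB_reverse]
      have h44 : n / 2 / 2 = n / 4 := by omega
      rw [h44]
      by_cases h4 : n / 4 = 0
      · rw [if_pos h4]
        rw [evenBitCount, if_neg (by omega), h4]
        have e0 : evenBitCount 0 = 0 := by rw [evenBitCount]; norm_num
        rw [e0]
        simp only [everyOther, List.count_cons, List.count_nil]
        have : n % 2 = 0 ∨ n % 2 = 1 := by omega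
        rcases this with h | h <;> simp [h, Nat.digitChar]
      · rw [if_neg h4]
        rw [evenBitCount, if_neg (by omega)]
        rw [bitsMSB_reverse]
        simp only [everyOther, List.count_cons]
        rw [← bitsMSB_reverse, ih (n / 4) (by omega) (by omega)]
        have : n % 2 = 0 ∨ n % 2 = 1 := by omega
        rcases this with h | h <;> simp [h, Nat.digitChar] <;> omega

-- B computes evenBitCount
theorem alt_eq (k : Nat) : count_set_even_bits_alt (k : Int) = (evenBitCount k : Int) := by
  simp only [count_set_even_bits_alt]
  rw [PySem.Int.toBinChars0b, if_neg (by omega : ¬ ((k : Int) < 0)), Int.toNat_natCast]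
  rw [show PySem.List.slice ('0' :: 'b' :: Nat.toDigits 2 k) (some 2) none = Nat.toDigits 2 k from by
        simp [pysem]]
  rw [PySem.List.slice?_none_none_neg_one, Option.getD_some, slice?_two, Option.getD_some,
      filterMap_everyOther, toDigits_two]
  rcases Nat.eq_zero_or_pos k with hk | hk
  · subst hk
    rw [bitsMSB]
    norm_num
    rw [show evenBitCount 0 = 0 by rw [evenBitCount]; norm_num]
    simp [everyOther, Nat.digitChar]
  · rw [count_everyOther_rev k hk]

-- ===== VERDICT (by name: the statement is the Claim_ definition above) =====
theorem count_set_even_bits_spec : Claim_equal_count_set_even_bits := by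
  intro n _ hpre
  unfold Spec_count_set_even_bits count_set_even_bits Pre_count_set_even_bits at *
  obtain ⟨k, rfl⟩ : ∃ k : Nat, n = (k : Int) := ⟨n.toNat, by omega⟩
  rw [csebLoop_eq, alt_eq, zero_add]
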